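-- pv_equiv track=rewrite | github.com/geekatron/jerry | scripts/jerry-validate-agent-schemas.py | validate_constitutional_triplet
-- ===== SOURCE A (Python) =====
-- from typing import Any
--
-- _CONSTITUTIONAL_TRIPLET = {"P-003", "P-020", "P-022"}
--
-- def validate_constitutional_triplet(composed: dict[str, Any]) -> list[str]:
--     """Validate H-35 constitutional triplet compliance.
--
--     Every agent MUST declare P-003, P-020, and P-022 in
--     ``constitution.principles_applied``.
--
--     Args:
--         composed: Fully merged agent configuration dict.
--
--     Returns:
--         List of error strings for missing constitutional principles.
--     """
--     principles = composed.get("constitution", {}).get("principles_applied", [])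
--     if not isinstance(principles, list):
--         return ["[H-35] constitution.principles_applied is not an array"]
--
--     # Each principle entry is a string like "P-003: No Recursive Subagents (Hard)".
--     # Extract the P-NNN prefix from each entry.
--     found_codes: set[str] = set()
--     for entry in principles:
--         if isinstance(entry, str):
--             # Match "P-NNN" at the start of the entry
--             stripped = entry.strip()
--             if stripped.startswith("P-"):
--                 # Extract up to the first non-digit-or-dash after "P-"
--                 code = stripped.split(":")[0].split(" ")[0].strip()
--                 found_codes.add(code)
--
--     missing = _CONSTITUTIONAL_TRIPLET - found_codes
--     if missing:
--         sorted_missing = sorted(missing)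
--         return [f"[H-35] constitution.principles_applied missing: {', '.join(sorted_missing)}"]
--
--     return []
-- ===== SOURCE B (Python) =====
-- _REQUIRED = ("P-003", "P-020", "P-022")  # required codes, already in sorted order
--
--
-- def _code(entry):
--     """A's exact parse: strip, require 'P-' prefix, take text before ':'/' '."""
--     if not isinstance(entry, str):
--         return None
--     stripped = entry.strip()
--     if not stripped.startswith("P-"):
--         return None
--     return stripped.split(":")[0].split(" ")[0].strip()
--
--
-- def validate_constitutional_triplet(composed):
--     principles = composed.get("constitution", {}).get("principles_applied", [])
--     if not isinstance(principles, list):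
--         return ["[H-35] constitution.principles_applied is not an array"]
--     missing = [c for c in _REQUIRED if not any(_code(e) == c for e in principles)]
--     if missing:
--         return ["[H-35] constitution.principles_applied missing: " + ", ".join(missing)]
--     return []
-- ===== Notes on version B (the rewrite author's own statement) =====
-- stated objective: simpler
-- what changed: B drops A's found-codes set entirely: it scans the principles list once per required code (in their fixed sorted order) and collects unmatched codes directly, so no set, no set difference and no sort are needed.
import Mathlib
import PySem

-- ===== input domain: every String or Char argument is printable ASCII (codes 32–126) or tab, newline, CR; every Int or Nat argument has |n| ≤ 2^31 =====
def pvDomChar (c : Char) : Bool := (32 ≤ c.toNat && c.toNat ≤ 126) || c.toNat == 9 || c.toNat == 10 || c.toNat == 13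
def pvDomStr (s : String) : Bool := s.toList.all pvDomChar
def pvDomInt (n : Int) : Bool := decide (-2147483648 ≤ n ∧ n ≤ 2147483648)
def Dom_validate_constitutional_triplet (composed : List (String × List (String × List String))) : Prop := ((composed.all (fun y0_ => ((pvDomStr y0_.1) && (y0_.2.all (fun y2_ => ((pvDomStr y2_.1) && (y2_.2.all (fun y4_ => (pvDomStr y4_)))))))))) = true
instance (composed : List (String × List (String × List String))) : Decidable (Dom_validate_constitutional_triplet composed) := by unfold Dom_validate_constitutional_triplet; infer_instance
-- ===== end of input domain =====

-- B is simpler: it drops A's found-codes set and, per required code (already sorted),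
-- scans the principles list for a matching entry; return value only, no side effects.

-- ===== PORT A =====
-- Literal port of A: build the set of parsed codes with a fold, subtract it from the
-- required-triplet set, sort the difference. The typed signature makes Python's two
-- isinstance checks always true, so those branches are unreachable and not ported.
def validate_constitutional_triplet (composed : List (String × List (String × List String))) : List String :=
  let principles : List String :=
    PySem.Dict.getD (PySem.Dict.mk (PySem.Dict.getD (PySem.Dict.mk composed) "constitution" [])) "principles_applied" []
  let found : PySem.Set String :=
    principles.foldl (fun s entry =>
      let stripped := PySem.Str.strip entry
      if PySem.Str.startswith stripped "P-" then
        -- stripped.split(":")[0].split(" ")[0].strip(); str.split(sep) is never empty, so [0] = headD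
        PySem.Set.add s (PySem.Str.strip (((((PySem.Str.split? (((PySem.Str.split? stripped ":").getD []).headD "") " ").getD []).headD ""))))
      else s) PySem.Set.empty
  let missing : PySem.Set String := PySem.Set.diff (PySem.Set.ofList ["P-003", "P-020", "P-022"]) found
  if missing ≠ [] then
    let sorted_missing := PySem.List.sorted missing (fun x => x) false
    [PySem.Str.join "" ["[H-35] constitution.principles_applied missing: ", PySem.Str.join ", " sorted_missing]]
  else []

-- ===== PORT B =====
-- A's exact parse of one entry: strip, require "P-" prefix, text before ':' / ' ', strip.
def vct_code? (entry : String) : Option String :=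
  let stripped := PySem.Str.strip entry
  if PySem.Str.startswith stripped "P-" then
    some (PySem.Str.strip (((((PySem.Str.split? (((PySem.Str.split? stripped ":").getD []).headD "") " ").getD []).headD ""))))
  else none

def validate_constitutional_triplet_alt (composed : List (String × List (String × List String))) : List String :=
  let principles : List String :=
    PySem.Dict.getD (PySem.Dict.mk (PySem.Dict.getD (PySem.Dict.mk composed) "constitution" [])) "principles_applied" []
  let missing : List String :=
    ["P-003", "P-020", "P-022"].filter (fun c => !(principles.any (fun e => vct_code? e == some c)))
  if missing = [] then []
  else [PySem.Str.join "" ["[H-35] constitution.principles_applied missing: ", PySem.Str.join ", " missing]]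

-- ===== PRECONDITION & SPEC =====
def Spec_validate_constitutional_triplet (composed : List (String × List (String × List String))) (out : List String) : Prop := out = validate_constitutional_triplet_alt composed
instance (composed : List (String × List (String × List String))) (out : List String) : Decidable (Spec_validate_constitutional_triplet composed out) := by unfold Spec_validate_constitutional_triplet; infer_instance

-- ===== CLAIM (what is proved, stated in full; the proofs are below) =====
def Claim_equal_validate_constitutional_triplet : Prop := ∀ (composed : List (String × List (String × List String))), Dom_validate_constitutional_triplet composed → Spec_validate_constitutional_triplet composed (validate_constitutional_triplet composed)

-- ===== LEMMAS AND PROOFS =====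

-- membership in A's fold-built set of codes, phrased through B's parse helper
theorem vct_mem_found (principles : List String) (s : PySem.Set String) (x : String) :
    (x ∈ principles.foldl (fun s entry =>
      let stripped := PySem.Str.strip entry
      if PySem.Str.startswith stripped "P-" then
        PySem.Set.add s (PySem.Str.strip (((((PySem.Str.split? (((PySem.Str.split? stripped ":").getD []).headD "") " ").getD []).headD ""))))
      else s) s)
    ↔ x ∈ s ∨ ∃ e ∈ principles, vct_code? e = some x := by
  induction principles generalizing s with
  | nil => simp
  | cons e t ih =>
    simp only [List.foldl_cons, List.mem_cons]
    by_cases h : PySem.Str.startswith (PySem.Str.strip e) "P-" = true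
    · rw [ih]
      simp only [h, if_true, PySem.Set.mem_add, vct_code?]
      constructor
      · rintro ((hs | he) | ⟨a, ha, hc⟩)
        · exact Or.inl hs
        · refine Or.inr ⟨e, Or.inl rfl, ?_⟩
          rw [if_pos h, he]
        · exact Or.inr ⟨a, Or.inr ha, hc⟩
      · rintro (hs | ⟨a, (rfl | ha), hc⟩)
        · exact Or.inl (Or.inl hs)
        · simp only [h, if_true, Option.some.injEq] at hc
          exact Or.inl (Or.inr hc.symm)
        · exact Or.inr ⟨a, ha, hc⟩
    · rw [if_neg h, ih]
      constructor
      · rintro (hs | ⟨a, ha, hc⟩)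
        · exact Or.inl hs
        · exact Or.inr ⟨a, Or.inr ha, hc⟩
      · rintro (hs | ⟨a, (rfl | ha), hc⟩)
        · exact Or.inl hs
        · unfold vct_code? at hc
          rw [if_neg h] at hc
          cases hc
        · exact Or.inr ⟨a, ha, hc⟩

-- A's sorted set difference IS B's filter over the (already sorted) required triplet
theorem vct_missing_eq (principles : List String) :
    PySem.List.sorted
      (PySem.Set.diff (PySem.Set.ofList ["P-003", "P-020", "P-022"])
        (principles.foldl (fun s entry =>
          let stripped := PySem.Str.strip entry
          if PySem.Str.startswith stripped "P-" then
            PySem.Set.add s (PySem.Str.strip (((((PySem.Str.split? (((PySem.Str.split? stripped ":").getD []).headD "") " ").getD []).headD ""))))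
          else s) PySem.Set.empty))
      (fun x => x) false
    = ["P-003", "P-020", "P-022"].filter (fun c => !(principles.any (fun e => vct_code? e == some c))) := by
  have htrip : List.Pairwise (fun a b : String => a < b) ["P-003", "P-020", "P-022"] := by
    simp [String.lt_iff_toList_lt]; decide
  apply PySem.List.sorted_eq_of_perm_of_pairwise_lt
  · rw [List.perm_ext_iff_of_nodup]
    · intro x
      have hol : PySem.Set.ofList ["P-003", "P-020", "P-022"] = ["P-003", "P-020", "P-022"] := by decide
      rw [PySem.Set.mem_diff, List.mem_filter, vct_mem_found, hol]
      simp only [PySem.Set.empty, List.not_mem_nil, false_or, Bool.not_eq_true',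
        List.any_eq_false]
      constructor
      · rintro ⟨hx, hb⟩
        refine ⟨hx, fun hex => ?_⟩
        obtain ⟨e, he, hc⟩ := hex
        exact beq_eq_false_iff_ne.mp (Bool.eq_false_iff.mpr (hb e he)) hc
      · rintro ⟨hx, hnf⟩
        refine ⟨hx, fun e he => ?_⟩
        have : ¬ vct_code? e = some x := fun hc => hnf ⟨e, he, hc⟩
        exact Bool.eq_false_iff.mp (beq_eq_false_iff_ne.mpr this)
    · exact List.Nodup.filter _ (by decide)
    · exact PySem.Set.nodup_diff _ _ (PySem.Set.nodup_ofList _)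
  · exact htrip.filter _

-- the whole body, as a function of the extracted principles list
theorem vct_core (principles : List String) :
    (if PySem.Set.diff (PySem.Set.ofList ["P-003", "P-020", "P-022"])
        (principles.foldl (fun s entry =>
          let stripped := PySem.Str.strip entry
          if PySem.Str.startswith stripped "P-" then
            PySem.Set.add s (PySem.Str.strip (((((PySem.Str.split? (((PySem.Str.split? stripped ":").getD []).headD "") " ").getD []).headD ""))))
          else s) PySem.Set.empty) ≠ [] then
      [PySem.Str.join "" ["[H-35] constitution.principles_applied missing: ",
        PySem.Str.join ", " (PySem.List.sorted
          (PySem.Set.diff (PySem.Set.ofList ["P-003", "P-020", "P-022"])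
            (principles.foldl (fun s entry =>
              let stripped := PySem.Str.strip entry
              if PySem.Str.startswith stripped "P-" then
                PySem.Set.add s (PySem.Str.strip (((((PySem.Str.split? (((PySem.Str.split? stripped ":").getD []).headD "") " ").getD []).headD ""))))
              else s) PySem.Set.empty))
          (fun x => x) false)]]
    else [])
    =
    (if ["P-003", "P-020", "P-022"].filter (fun c => !(principles.any (fun e => vct_code? e == some c))) = [] then []
     else [PySem.Str.join "" ["[H-35] constitution.principles_applied missing: ",
        PySem.Str.join ", " (["P-003", "P-020", "P-022"].filter (fun c => !(principles.any (fun e => vct_code? e == some c))))]]) := by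
  have hs := vct_missing_eq principles
  have hnil := (PySem.List.sorted_eq_nil_iff (κ := String)
    (PySem.Set.diff (PySem.Set.ofList ["P-003", "P-020", "P-022"])
      (principles.foldl (fun s entry =>
        let stripped := PySem.Str.strip entry
        if PySem.Str.startswith stripped "P-" then
          PySem.Set.add s (PySem.Str.strip (((((PySem.Str.split? (((PySem.Str.split? stripped ":").getD []).headD "") " ").getD []).headD ""))))
        else s) PySem.Set.empty))
    (fun x => x) false)
  rw [hs] at hnil
  by_cases hm : ["P-003", "P-020", "P-022"].filter (fun c => !(principles.any (fun e => vct_code? e == some c))) = []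
  · rw [if_neg (not_not.mpr (hnil.mp hm)), if_pos hm]
  · rw [if_pos (fun h => hm (hnil.mpr h)), if_neg hm, hs]

-- ===== VERDICT (by name: the statement is the Claim_ definition above) =====
theorem validate_constitutional_triplet_spec : Claim_equal_validate_constitutional_triplet := by
  intro composed _
  exact vct_core _
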